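-- pv_equiv track=rewrite | github.com/tonzowonzo/invasive-classifier | invasive_classifier/data/dataset.py | boxes_from_points
-- ===== SOURCE A (Python) =====
-- from collections import Counter, defaultdict
-- from typing import List, Dict, Tuple, Optional, Set
--
-- def boxes_from_points(points: List[Tuple[int,int,int]], pad=12, W=None, H=None):
--     by_f = defaultdict(list)
--     for x, y, f in points:
--         by_f[int(f)].append((float(x), float(y)))
--     boxes = {}
--     for f, xy in by_f.items():
--         xs, ys = zip(*xy)
--         x1, y1 = int(min(xs) - pad), int(min(ys) - pad)
--         x2, y2 = int(max(xs) + pad), int(max(ys) + pad)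
--         if W is not None and H is not None:
--             x1, y1 = max(0, x1), max(0, y1)
--             x2, y2 = min(W - 1, x2), min(H - 1, y2)
--         if x2 > x1 and y2 > y1:
--             boxes[f] = (x1, y1, x2, y2)
--     return boxes
-- ===== SOURCE B (Python) =====
-- def boxes_from_points(points, pad=12, W=None, H=None):
--     # One pass: keep running (min_x, min_y, max_x, max_y) per frame instead of a point list.
--     stats = {}
--     for x, y, f in points:
--         fi = int(f)
--         s = stats.get(fi)
--         if s is None:
--             stats[fi] = (x, y, x, y)
--         else:
--             stats[fi] = (min(s[0], x), min(s[1], y), max(s[2], x), max(s[3], y))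
--     boxes = {}
--     for f, (mnx, mny, mxx, mxy) in stats.items():
--         x1, y1 = mnx - pad, mny - pad
--         x2, y2 = mxx + pad, mxy + pad
--         if W is not None and H is not None:
--             x1, y1 = max(0, x1), max(0, y1)
--             x2, y2 = min(W - 1, x2), min(H - 1, y2)
--         if x2 > x1 and y2 > y1:
--             boxes[f] = (x1, y1, x2, y2)
--     return boxes
-- ===== Notes on version B (the rewrite author's own statement) =====
-- stated objective: simpler
-- what changed: Instead of grouping all points into per-frame lists and then reducing each list with zip/min/max, B keeps just a running (min_x, min_y, max_x, max_y) 4-tuple per frame in one pass and builds the boxes from those scalars.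
import Mathlib
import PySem

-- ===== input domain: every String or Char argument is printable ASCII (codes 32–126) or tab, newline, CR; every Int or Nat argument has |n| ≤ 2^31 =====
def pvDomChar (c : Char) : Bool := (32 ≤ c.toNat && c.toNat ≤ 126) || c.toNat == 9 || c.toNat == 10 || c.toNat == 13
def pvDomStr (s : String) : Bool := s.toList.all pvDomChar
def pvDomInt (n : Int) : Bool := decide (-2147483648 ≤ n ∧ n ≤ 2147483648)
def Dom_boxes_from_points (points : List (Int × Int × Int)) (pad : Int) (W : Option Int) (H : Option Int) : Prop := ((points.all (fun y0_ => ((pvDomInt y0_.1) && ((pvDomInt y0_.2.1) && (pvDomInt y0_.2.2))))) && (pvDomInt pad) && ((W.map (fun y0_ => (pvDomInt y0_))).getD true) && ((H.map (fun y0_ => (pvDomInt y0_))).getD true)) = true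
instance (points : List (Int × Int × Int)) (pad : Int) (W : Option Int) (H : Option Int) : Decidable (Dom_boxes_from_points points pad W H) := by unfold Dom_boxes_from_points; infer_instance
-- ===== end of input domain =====

-- B replaces A's group-points-into-lists-then-reduce with a single pass that keeps only the four
-- running extremes per frame (objective: simpler bookkeeping, same result).
-- The dict return value is modelled as its association list in insertion order.
-- All coordinates are ints, so Python's float round-trip (float(x), int(...)) is exact on Dom.

-- ===== PORT A =====
-- the final clamp/filter applied to one frame's raw (x1,y1,x2,y2); shared verbatim by both ports
-- (it is the same Python text in Source A and Source B)
def pvFinishBox (bx : PySem.Dict Int (Int × Int × Int × Int)) (f x1 y1 x2 y2 : Int)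
    (W H : Option Int) : PySem.Dict Int (Int × Int × Int × Int) :=
  match W, H with
  | some w, some h =>
    let x1 := max 0 x1
    let y1 := max 0 y1
    let x2 := min (w - 1) x2
    let y2 := min (h - 1) y2
    if x2 > x1 ∧ y2 > y1 then bx.insert f (x1, y1, x2, y2) else bx
  | _, _ =>
    if x2 > x1 ∧ y2 > y1 then bx.insert f (x1, y1, x2, y2) else bx

def boxes_from_points (points : List (Int × Int × Int)) (pad : Int) (W : Option Int) (H : Option Int) : List (Int × Int × Int × Int × Int) :=
  -- by_f[int(f)].append((float(x), float(y)))
  let by_f : PySem.Dict Int (List (Int × Int)) :=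
    points.foldl (fun d p => d.modify p.2.2 [] (· ++ [(p.1, p.2.1)])) PySem.Dict.empty
  let boxes : PySem.Dict Int (Int × Int × Int × Int) :=
    by_f.items.foldl (fun bx q =>
      let xs := q.2.map (·.1)
      let ys := q.2.map (·.2)
      -- xy is never empty, so min?/max? are always some; getD 0 is unreachable
      let x1 := ((PySem.List.min? xs (fun y => y)).getD 0) - pad
      let y1 := ((PySem.List.min? ys (fun y => y)).getD 0) - pad
      let x2 := ((PySem.List.max? xs (fun y => y)).getD 0) + pad
      let y2 := ((PySem.List.max? ys (fun y => y)).getD 0) + pad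
      pvFinishBox bx q.1 x1 y1 x2 y2 W H) PySem.Dict.empty
  boxes.items

-- ===== PORT B =====
def boxes_from_points_alt (points : List (Int × Int × Int)) (pad : Int) (W : Option Int) (H : Option Int) : List (Int × Int × Int × Int × Int) :=
  let stats : PySem.Dict Int (Int × Int × Int × Int) :=
    points.foldl (fun d p =>
      match d.get? p.2.2 with
      | none => d.insert p.2.2 (p.1, p.2.1, p.1, p.2.1)
      | some s => d.insert p.2.2 (min s.1 p.1, min s.2.1 p.2.1, max s.2.2.1 p.1, max s.2.2.2 p.2.1))
      PySem.Dict.empty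
  let boxes : PySem.Dict Int (Int × Int × Int × Int) :=
    stats.items.foldl (fun bx q =>
      pvFinishBox bx q.1 (q.2.1 - pad) (q.2.2.1 - pad) (q.2.2.2.1 + pad) (q.2.2.2.2 + pad) W H)
      PySem.Dict.empty
  boxes.items

-- ===== PRECONDITION & SPEC =====
def Spec_boxes_from_points (points : List (Int × Int × Int)) (pad : Int) (W : Option Int) (H : Option Int) (out : List (Int × Int × Int × Int × Int)) : Prop := out = boxes_from_points_alt points pad W H
instance (points : List (Int × Int × Int)) (pad : Int) (W : Option Int) (H : Option Int) (out : List (Int × Int × Int × Int × Int)) : Decidable (Spec_boxes_from_points points pad W H out) := by unfold Spec_boxes_from_points; infer_instance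

-- ===== CLAIM (what is proved, stated in full; the proofs are below) =====
def Claim_equal_boxes_from_points : Prop := ∀ (points : List (Int × Int × Int)) (pad : Int) (W : Option Int) (H : Option Int), Dom_boxes_from_points points pad W H → Spec_boxes_from_points points pad W H (boxes_from_points points pad W H)

-- ===== LEMMAS AND PROOFS =====

-- B's running-extremes update
def pvUpd (s : Int × Int × Int × Int) (x y : Int) : Int × Int × Int × Int :=
  (min s.1 x, min s.2.1 y, max s.2.2.1 x, max s.2.2.2 y)

-- summary of a frame's point list (junk value on [], which never occurs)
def pvSumm : List (Int × Int) → Int × Int × Int × Int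
  | [] => (0, 0, 0, 0)
  | (x, y) :: t => t.foldl (fun s q => pvUpd s q.1 q.2) (x, y, x, y)

theorem pvSumm_append (l : List (Int × Int)) (hl : l ≠ []) (x y : Int) :
    pvSumm (l ++ [(x, y)]) = pvUpd (pvSumm l) x y := by
  cases l with
  | nil => exact absurd rfl hl
  | cons h t =>
    obtain ⟨a, b⟩ := h
    simp [pvSumm, List.foldl_append]

theorem pvFold_components (t : List (Int × Int)) (a b c d : Int) :
    t.foldl (fun s q => pvUpd s q.1 q.2) (a, b, c, d) =
      ((t.map (·.1)).foldl min a, (t.map (·.2)).foldl min b,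
       (t.map (·.1)).foldl max c, (t.map (·.2)).foldl max d) := by
  induction t generalizing a b c d with
  | nil => rfl
  | cons h t ih => simpa [pvUpd] using ih _ _ _ _

-- phase-1 simulation: B's stats dict is A's by_f dict with each list summarized
theorem pvPhase1 (l : List (Int × Int × Int)) (dA : PySem.Dict Int (List (Int × Int)))
    (dB : PySem.Dict Int (Int × Int × Int × Int))
    (hB : dB.items = dA.items.map (fun p => (p.1, pvSumm p.2)))
    (hne : ∀ p ∈ dA.items, p.2 ≠ []) :
    (l.foldl (fun d p =>
        match d.get? p.2.2 with
        | none => d.insert p.2.2 (p.1, p.2.1, p.1, p.2.1)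
        | some s => d.insert p.2.2 (min s.1 p.1, min s.2.1 p.2.1, max s.2.2.1 p.1, max s.2.2.2 p.2.1)) dB).items
      = (l.foldl (fun d p => d.modify p.2.2 [] (· ++ [(p.1, p.2.1)])) dA).items.map
          (fun p => (p.1, pvSumm p.2))
    ∧ ∀ p ∈ (l.foldl (fun d p => d.modify p.2.2 [] (· ++ [(p.1, p.2.1)])) dA).items, p.2 ≠ [] := by
  induction l generalizing dA dB with
  | nil => exact ⟨hB, hne⟩
  | cons p l ih =>
    obtain ⟨x, y, f⟩ := p
    -- relate lookups
    have hget : dB.get? f = (dA.get? f).map pvSumm := by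
      simp only [PySem.Dict.get?, hB, List.find?_map]
      cases hfind : dA.items.find? (fun q => q.1 == f) <;> simp [Function.comp_def, hfind]
    have hcont : dB.contains f = dA.contains f := by
      simp [PySem.Dict.contains, hB, List.any_map, Function.comp_def]
    simp only [List.foldl_cons]
    cases hA : dA.get? f with
    | none =>
      have hcA : dA.contains f = false := (PySem.Dict.get?_eq_none_iff_contains dA f).mp hA
      have hB' : (dB.insert f (x, y, x, y)).items
          = (dA.modify f [] (· ++ [(x, y)])).items.map (fun p => (p.1, pvSumm p.2)) := by
        simp [PySem.Dict.insert, PySem.Dict.modify, PySem.Dict.getD, hA, hcA, hcont, hB, pvSumm]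
      have hne' : ∀ q ∈ (dA.modify f [] (· ++ [(x, y)])).items, q.2 ≠ [] := by
        intro q hq
        simp [PySem.Dict.modify, PySem.Dict.insert, PySem.Dict.getD, hA, hcA] at hq
        rcases hq with hq | hq
        · exact hne q hq
        · subst hq; simp
      simpa [hget, hA] using ih _ _ hB' hne'
    | some lf =>
      have hlf : lf ≠ [] := by
        simp only [PySem.Dict.get?, Option.map_eq_some_iff] at hA
        obtain ⟨q, hq1, hq2⟩ := hA
        exact hq2 ▸ hne q (List.mem_of_find?_eq_some hq1)
      have hcA : dA.contains f = true := by
        by_contra hc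
        have := (PySem.Dict.get?_eq_none_iff_contains dA f).mpr (by simpa using hc)
        simp [hA] at this
      have hB' : (dB.insert f (pvUpd (pvSumm lf) x y)).items
          = (dA.modify f [] (· ++ [(x, y)])).items.map (fun p => (p.1, pvSumm p.2)) := by
        simp only [PySem.Dict.insert, PySem.Dict.modify, PySem.Dict.getD, hA, hcA, hcont,
          Option.getD_some, if_pos]
        simp only [hB, List.map_map]
        apply List.map_congr_left
        intro q _
        by_cases hqf : q.1 = f
        · simp [hqf, pvSumm_append lf hlf]
        · simp [hqf]
      have hne' : ∀ q ∈ (dA.modify f [] (· ++ [(x, y)])).items, q.2 ≠ [] := by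
        intro q hq
        simp only [PySem.Dict.modify, PySem.Dict.insert, PySem.Dict.getD, hA, hcA,
          Option.getD_some, if_pos, List.mem_map] at hq
        obtain ⟨r, hr, hrq⟩ := hq
        by_cases hrf : r.1 = f
        · rw [← hrq]; simp [hrf]
        · rw [← hrq]
          simp only [show (r.1 == f) = false by simpa using hrf, Bool.false_eq_true, if_false]
          exact hne r hr
      have hstep : (match dB.get? f with
          | none => dB.insert f (x, y, x, y)
          | some s => dB.insert f (min s.1 x, min s.2.1 y, max s.2.2.1 x, max s.2.2.2 y))
          = dB.insert f (pvUpd (pvSumm lf) x y) := by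
        simp [hget, hA, pvUpd]
      rw [hstep]
      exact ih _ _ hB' hne'

-- per-frame: the summarized extremes are exactly A's min/max reductions
theorem pvSumm_eq_minmax (xy : List (Int × Int)) (hxy : xy ≠ []) :
    pvSumm xy =
      (((PySem.List.min? (xy.map (·.1)) (fun y => y)).getD 0),
       ((PySem.List.min? (xy.map (·.2)) (fun y => y)).getD 0),
       ((PySem.List.max? (xy.map (·.1)) (fun y => y)).getD 0),
       ((PySem.List.max? (xy.map (·.2)) (fun y => y)).getD 0)) := by
  cases xy with
  | nil => exact absurd rfl hxy
  | cons h t =>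
    obtain ⟨x, y⟩ := h
    simp [pvSumm, pvFold_components, PySem.List.min?_id_cons, PySem.List.max?_id_cons]

-- ===== VERDICT (by name: the statement is the Claim_ definition above) =====
theorem boxes_from_points_spec : Claim_equal_boxes_from_points := by
  intro points pad W H _
  show _ = _
  simp only [boxes_from_points, boxes_from_points_alt]
  obtain ⟨hitems, hne⟩ := pvPhase1 points PySem.Dict.empty PySem.Dict.empty (by rfl) (by simp [PySem.Dict.empty])
  rw [hitems, List.foldl_map]
  congr 1
  apply PySem.List.foldl_congr_mem
  intro bx q hq
  rw [pvSumm_eq_minmax q.2 (hne q hq)]
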